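-- pv_equiv track=rewrite | github.com/pta-project-repo/pta-artifacts | Barefoot_Tofino/p4v-to-dpv/scripts/library.py | idf_val
-- ===== SOURCE A (Python) =====
-- def idf_val(headers, string):
--     value = "nf"
--     string = str(string).replace(' ','')
--     string = str(string).replace(',','')
--     string = str(string).replace(';','')
--     string = str(string).replace('\n','')
--     string = str(string).replace('(','')
--     string = str(string).replace(')','')
--     for line in headers:
--         for elem in line:
--             if (str(string) == (str(line[0][0]) + "." + str(elem[0]))):
--                 value = str(elem[1])
--     return value
-- ===== SOURCE B (Python) =====
-- def idf_val(headers, string):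
--     s = str(string)
--     for ch in " ,;\n()":
--         s = s.replace(ch, '')
--     for line in reversed(headers):
--         if not line or not line[0]:
--             continue
--         prefix = str(line[0][0]) + "."
--         if not s.startswith(prefix):
--             continue
--         suffix = s[len(prefix):]
--         for elem in reversed(line):
--             if str(elem[0]) == suffix:
--                 return str(elem[1])
--     return "nf"
-- ===== Notes on version B (the rewrite author's own statement) =====
-- stated objective: alternative
-- what changed: B scans the headers back-to-front with an early return at the first match (= A's last match), and skips a whole line without touching its elements unless the normalized string starts with that line's prefix, instead of A's exhaustive forward scan that compares every (line, elem) pair and keeps overwriting an accumulator.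
import Mathlib
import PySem

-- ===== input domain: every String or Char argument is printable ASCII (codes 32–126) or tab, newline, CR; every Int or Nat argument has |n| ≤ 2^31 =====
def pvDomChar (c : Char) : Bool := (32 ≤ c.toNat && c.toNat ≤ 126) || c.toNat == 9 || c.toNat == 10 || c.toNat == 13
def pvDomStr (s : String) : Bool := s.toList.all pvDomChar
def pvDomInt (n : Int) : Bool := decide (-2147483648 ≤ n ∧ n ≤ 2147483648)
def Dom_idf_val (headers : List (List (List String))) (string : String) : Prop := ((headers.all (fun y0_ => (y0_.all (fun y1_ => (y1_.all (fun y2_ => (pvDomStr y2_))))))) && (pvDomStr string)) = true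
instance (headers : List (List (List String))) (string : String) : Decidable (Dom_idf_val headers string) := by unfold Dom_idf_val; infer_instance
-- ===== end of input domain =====

-- B scans back-to-front with an early return at the first match (= A's last match) and prunes
-- whole lines whose prefix the normalized string does not start with; same cost class as A.

-- ===== PORT A =====
-- A's six successive .replace calls, then the exhaustive nested forward scan keeping the last match.
def idf_val (headers : List (List (List String))) (string : String) : String :=
  let s := PySem.Str.replace (PySem.Str.replace (PySem.Str.replace (PySem.Str.replace
             (PySem.Str.replace (PySem.Str.replace string " " "") "," "") ";" "") "\n" "") "(" "") ")" ""
  headers.foldl (fun value line =>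
    line.foldl (fun value elem =>
      -- line[0][0] and elem[0]/elem[1] raise IndexError in Python when missing; Pre_ excludes those inputs
      if s = ((PySem.List.pyGet? ((PySem.List.pyGet? line 0).getD []) 0).getD "") ++ "." ++
             ((PySem.List.pyGet? elem 0).getD "")
      then (PySem.List.pyGet? elem 1).getD ""
      else value) value) "nf"

-- ===== PORT B =====
-- Source B's inner 'for elem in reversed(line): if elem[0] == suffix: return elem[1]'
def pvFindRev (suffix : String) : List (List String) → Option String
  | [] => none
  | e :: rest =>
    if ((PySem.List.pyGet? e 0).getD "") = suffix then some ((PySem.List.pyGet? e 1).getD "")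
    else pvFindRev suffix rest

-- Source B's outer 'for line in reversed(headers)' with the continue guards and the startswith pruning
def pvScanRev (s : String) : List (List (List String)) → Option String
  | [] => none
  | line :: rest =>
    match line with
    | [] => pvScanRev s rest                  -- 'if not line: continue'
    | [] :: _ => pvScanRev s rest             -- 'if not line[0]: continue'
    | (p :: _) :: _ =>
      if PySem.Str.startswith s (p ++ ".") then
        match pvFindRev (PySem.Str.slice s (some ((PySem.Str.len (p ++ ".") : Int))) none) line.reverse with
        | some v => some v                    -- early return
        | none => pvScanRev s rest
      else pvScanRev s rest                   -- 'if not s.startswith(prefix): continue'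

-- Source B: normalize by folding the replaces over the characters of " ,;\n()", then the reverse scan.
def idf_val_alt (headers : List (List (List String))) (string : String) : String :=
  let s := (" ,;\n()".toList).foldl (fun t c => PySem.Str.replace t (String.singleton c) "") string
  (pvScanRev s headers.reverse).getD "nf"

-- ===== PRECONDITION & SPEC =====
-- normalization as A performs it, restated for the precondition
def pvNorm_idf_val (string : String) : String :=
  PySem.Str.replace (PySem.Str.replace (PySem.Str.replace (PySem.Str.replace
    (PySem.Str.replace (PySem.Str.replace string " " "") "," "") ";" "") "\n" "") "(" "") ")" ""

-- Pre_ excludes exactly the inputs on which A raises IndexError: a non-empty line whose first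
-- element list is empty, an empty elem, or a length-1 elem whose key equals the normalized string.
def Pre_idf_val (headers : List (List (List String))) (string : String) : Prop :=
  ∀ line ∈ headers, line ≠ [] →
    (line.headI ≠ [] ∧ ∀ elem ∈ line, elem ≠ [] ∧
      (pvNorm_idf_val string = line.headI.headI ++ "." ++ elem.headI → elem.tail ≠ []))
instance (headers : List (List (List String))) (string : String) : Decidable (Pre_idf_val headers string) := by
  unfold Pre_idf_val; infer_instance

def pvWitness_idf_val : List (List (List String)) × String := ([[["a", "b"]]], "a.a")

def Spec_idf_val (headers : List (List (List String))) (string : String) (out : String) : Prop := out = idf_val_alt headers string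
instance (headers : List (List (List String))) (string : String) (out : String) : Decidable (Spec_idf_val headers string out) := by unfold Spec_idf_val; infer_instance

-- ===== CLAIM (what is proved, stated in full; the proofs are below) =====
def Claim_equal_idf_val : Prop := ∀ (headers : List (List (List String))) (string : String), Dom_idf_val headers string → Pre_idf_val headers string → Spec_idf_val headers string (idf_val headers string)

-- ===== LEMMAS AND PROOFS =====

-- the two normalizations agree (B folds the chain, A spells it out)
theorem pv_norm_eq (string : String) :
    (" ,;\n()".toList).foldl (fun t c => PySem.Str.replace t (String.singleton c) "") string
      = pvNorm_idf_val string := by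
  rfl

theorem pv_findRev_append (suffix : String) (xs ys : List (List String)) :
    pvFindRev suffix (xs ++ ys)
      = match pvFindRev suffix xs with
        | some v => some v
        | none => pvFindRev suffix ys := by
  induction xs with
  | nil => simp [pvFindRev]
  | cons e rest ih =>
    simp only [List.cons_append, pvFindRev]
    split_ifs <;> simp [ih]

theorem pv_scanRev_append (s : String) (xs ys : List (List (List String))) :
    pvScanRev s (xs ++ ys)
      = match pvScanRev s xs with
        | some v => some v
        | none => pvScanRev s ys := by
  induction xs with
  | nil => simp [pvScanRev]
  | cons line rest ih =>
    match line with
    | [] => simpa [pvScanRev] using ih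
    | [] :: _ => simpa [pvScanRev] using ih
    | (p :: f) :: t =>
      simp only [List.cons_append, pvScanRev]
      split_ifs with h
      · cases hf : pvFindRev (PySem.Str.slice s (some ((PySem.Str.len (p ++ ".") : Int))) none)
          (((p :: f) :: t).reverse) <;> simp [ih]
      · exact ih

-- the inner forward fold equals the reverse first-match lookup
theorem pv_inner_eq (suffix : String) (l : List (List String)) (value : String) :
    l.foldl (fun v e =>
        if ((PySem.List.pyGet? e 0).getD "") = suffix
        then (PySem.List.pyGet? e 1).getD ""
        else v) value
      = (pvFindRev suffix l.reverse).getD value := by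
  induction l generalizing value with
  | nil => simp [pvFindRev]
  | cons e rest ih =>
    simp only [List.foldl_cons, List.reverse_cons, pv_findRev_append, ih]
    cases hr : pvFindRev suffix rest.reverse with
    | some v => simp
    | none => simp only [Option.getD_none]; split_ifs <;> simp [pvFindRev, *]

-- a fold whose condition never holds returns its accumulator
theorem pv_foldl_if_false {α : Type} (C : α → Prop) [DecidablePred C] (g : α → String)
    (l : List α) (value : String) (h : ∀ e ∈ l, ¬ C e) :
    l.foldl (fun v e => if C e then g e else v) value = value := by
  induction l generalizing value with
  | nil => rfl
  | cons e rest ih =>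
    simp only [List.foldl_cons, if_neg (h e (by simp))]
    exact ih value (fun e' he' => h e' (List.mem_cons_of_mem _ he'))

-- startswith gives the decomposition: s = pre ++ k iff k is the slice past pre
theorem pv_startswith_decomp (s pre : String)
    (h : PySem.Str.startswith s pre = true) (k : String) :
    (s = pre ++ k) ↔ (k = PySem.Str.slice s (some ((PySem.Str.len pre : Int))) none) := by
  have hpref : pre.toList <+: s.toList := by
    simpa [PySem.Chars.startswith_iff] using h
  obtain ⟨t, ht⟩ := hpref
  have hslice : (PySem.Str.slice s (some ((PySem.Str.len pre : Int))) none).toList = t := by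
    have : (PySem.Str.slice s (some ((PySem.Str.len pre : Int))) none).toList
        = s.toList.drop pre.toList.length := by
      simp [PySem.Str.slice, PySem.Chars.slice_eq_listSlice, PySem.Str.len,
        PySem.List.slice_from_natCast]
    rw [this, ← ht, List.drop_left]
  constructor
  · intro he
    apply String.toList_injective
    rw [hslice]
    have h2 : s.toList = pre.toList ++ k.toList := by
      rw [he]; simp
    rw [← ht] at h2
    exact (List.append_cancel_left h2.symm)
  · intro he
    apply String.toList_injective
    have hdrop : List.drop pre.length s.toList = t := by
      rw [← ht]; simp
    have h2 : (pre ++ PySem.Str.slice s (some ((PySem.Str.len pre : Int))) none).toList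
        = pre.toList ++ List.drop pre.length s.toList := by simp
    rw [he, h2, hdrop, ht]

theorem pv_not_startswith (s pre : String)
    (h : ¬ PySem.Str.startswith s pre = true) (k : String) : s ≠ pre ++ k := by
  intro he
  apply h
  have : pre.toList <+: s.toList := ⟨k.toList, by rw [he]; simp⟩
  simpa [PySem.Chars.startswith_iff] using this

-- one line of A's outer fold equals the scan of that single line
theorem pv_line_eq (s : String) (line : List (List String)) (value : String)
    (hh : line ≠ [] → line.headI ≠ []) :
    line.foldl (fun value elem =>
        if s = ((PySem.List.pyGet? ((PySem.List.pyGet? line 0).getD []) 0).getD "") ++ "." ++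
               ((PySem.List.pyGet? elem 0).getD "")
        then (PySem.List.pyGet? elem 1).getD ""
        else value) value
      = (pvScanRev s [line]).getD value := by
  match line with
  | [] => simp [pvScanRev]
  | [] :: t => exact (hh (by simp) (by simp)).elim
  | (p :: f) :: t =>
    have hp : ((PySem.List.pyGet? ((PySem.List.pyGet? ((p :: f) :: t) 0).getD []) 0).getD "") = p := by
      simp
    by_cases hs : PySem.Str.startswith s (p ++ ".") = true
    · have hcond : ∀ k : String, (s = p ++ "." ++ k)
          = (k = PySem.Str.slice s (some ((PySem.Str.len (p ++ ".") : Int))) none) :=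
        fun k => propext (pv_startswith_decomp s (p ++ ".") hs k)
      simp only [hp, hcond]
      rw [pv_inner_eq]
      show _ = (pvScanRev s [(p :: f) :: t]).getD value
      simp only [pvScanRev]
      rw [if_pos hs]
      cases hf : pvFindRev (PySem.Str.slice s (some ((PySem.Str.len (p ++ ".") : Int))) none)
          (((p :: f) :: t).reverse) <;> simp
    · have hfalse : ∀ e ∈ (p :: f) :: t,
          ¬ (s = p ++ "." ++ ((PySem.List.pyGet? e 0).getD "")) :=
        fun e _ => pv_not_startswith s (p ++ ".") hs _
      simp only [hp]
      rw [pv_foldl_if_false _ _ _ _ hfalse]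
      show _ = (pvScanRev s [(p :: f) :: t]).getD value
      simp only [pvScanRev]
      rw [if_neg hs]
      simp

-- the outer forward fold equals the reverse scan
theorem pv_outer_eq (s : String) (headers : List (List (List String))) (value : String)
    (hpre : ∀ line ∈ headers, line ≠ [] → line.headI ≠ []) :
    headers.foldl (fun value line =>
        line.foldl (fun value elem =>
          if s = ((PySem.List.pyGet? ((PySem.List.pyGet? line 0).getD []) 0).getD "") ++ "." ++
                 ((PySem.List.pyGet? elem 0).getD "")
          then (PySem.List.pyGet? elem 1).getD ""
          else value) value) value
      = (pvScanRev s headers.reverse).getD value := by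
  induction headers generalizing value with
  | nil => simp [pvScanRev]
  | cons line rest ih =>
    simp only [List.foldl_cons, List.reverse_cons, pv_scanRev_append]
    rw [ih _ (fun l hm => hpre l (List.mem_cons_of_mem _ hm))]
    cases hr : pvScanRev s rest.reverse with
    | some v => simp
    | none =>
      simp only [Option.getD_none]
      exact pv_line_eq s line value (hpre line (by simp))

-- ===== VERDICT (by name: the statement is the Claim_ definition above) =====
theorem idf_val_spec : Claim_equal_idf_val := by
  intro headers string _ hpre
  unfold Spec_idf_val idf_val idf_val_alt
  rw [pv_norm_eq]
  exact pv_outer_eq (pvNorm_idf_val string) headers "nf"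
    (fun line hm hne => (hpre line hm hne).1)
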